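-- pv_equiv track=rewrite | github.com/SeanLynch1/LeetCode | 2607-make-k-subarray-sums-equal/2607-make-k-subarray-sums-equal.py | makeSubKSumEqual
-- ===== SOURCE A (Python) =====
-- from typing import List
--
-- def makeSubKSumEqual(arr: List[int], k: int) -> int:
--
--     n = len(arr)
--     medians = []
--     output = 0
--
--     def gcd(a:int, b:int):
--
--         if b == 0:
--             return a
--
--         return gcd(b, a%b)
--
--     cycles = gcd(len(arr), k)
--
--     for c in range(cycles):
--         jump = (c + k) % n
--         temp = [arr[c % n]]
--
--         while jump != c:
--             temp.append(arr[jump])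
--
--             jump += k
--             jump %= n
--
--         temp.sort()
--         median_temp = temp[int(len(temp) / 2)]
--         medians.append(median_temp)
--
--     for c in range(cycles):
--         jump = (c + k) % n
--         output += abs(medians[c] - arr[c % n])
--
--         while jump != c:
--             output += abs(medians[c] - arr[jump])
--
--             jump += k
--             jump %= n
--
--     return output
-- ===== SOURCE B (Python) =====
-- from typing import List
--
-- def _select(l: List[int], j: int) -> int:
--     # j-th smallest element of l (0-indexed): iterative quickselect, middle pivot.
--     while True:
--         p = l[len(l) // 2]
--         less = [x for x in l if x < p]
--         if j < len(less):
--             l = less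
--             continue
--         eq = l.count(p)
--         if j < len(less) + eq:
--             return p
--         j -= len(less) + eq
--         l = [x for x in l if x > p]
--
-- def makeSubKSumEqual(arr: List[int], k: int) -> int:
--     # Rotating by k ties together exactly the positions that agree mod gcd(n, k),
--     # so each such stride class must be made constant; the cheapest target is its
--     # (upper) median, found by selection rather than by sorting.
--     n = len(arr)
--     a, b = n, k
--     while b:
--         a, b = b, a % b
--     g = a
--     total = 0
--     for r in range(g):
--         grp = [arr[i] for i in range(r, n, g)]
--         m = _select(grp, len(grp) // 2)
--         total += sum(abs(m - x) for x in grp)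
--     return total
-- ===== Notes on version B (the rewrite author's own statement) =====
-- stated objective: faster
-- what changed: A walks each gcd(n,k)-cycle with a modular jump pointer, sorts the collected cycle and indexes its median, then re-walks every cycle to accumulate |median - x|; B gathers each class as the stride slice arr[r::g] in one comprehension and finds its median by an iterative quickselect (partition around a pivot, recurse into one side) with no sorting and no second pass. Pre_ excludes only the empty list with k > 0, where A raises ZeroDivisionError (B raises IndexError there too).
import Mathlib
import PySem

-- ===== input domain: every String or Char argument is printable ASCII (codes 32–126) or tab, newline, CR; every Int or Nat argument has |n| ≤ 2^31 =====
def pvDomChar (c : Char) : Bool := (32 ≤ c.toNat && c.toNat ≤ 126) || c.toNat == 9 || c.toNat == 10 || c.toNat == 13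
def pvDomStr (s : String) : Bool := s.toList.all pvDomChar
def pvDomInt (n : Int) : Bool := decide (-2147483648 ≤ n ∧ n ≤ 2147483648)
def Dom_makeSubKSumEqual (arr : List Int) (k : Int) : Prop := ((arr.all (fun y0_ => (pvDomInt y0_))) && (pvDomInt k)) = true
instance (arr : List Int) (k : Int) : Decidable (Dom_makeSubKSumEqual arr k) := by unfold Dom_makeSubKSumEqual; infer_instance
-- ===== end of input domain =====

-- B replaces A's cycle walks + per-cycle sort by stride-class comprehensions and a quickselect median (no sorting); same return values.

-- Python's floor-mod is absolutely smaller than a nonzero divisor (termination of both gcd loops; cited by the ports)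
theorem pvModAbsLt (a b : Int) (hb : b ≠ 0) : (PySem.Int.mod a b).natAbs < b.natAbs := by
  rcases lt_or_gt_of_ne hb with h | h
  · have := PySem.Int.mod_neg_bounds a h
    omega
  · have h1 := PySem.Int.mod_nonneg a h
    have h2 := PySem.Int.mod_lt a h
    omega

-- ===== PORT A =====
-- A's inner recursive gcd
def pvGcdA (a b : Int) : Int :=
  if hb : b = 0 then a else pvGcdA b (PySem.Int.mod a b)
termination_by b.natAbs
decreasing_by exact pvModAbsLt a b hb

-- A's 'while jump != c' loop of the first pass; fuel = len(arr) always suffices on Pre_ (proved below)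
def pvTempLoop (arr : List Int) (n k c : Int) : Nat → Int → List Int → List Int
  | 0, _, temp => temp
  | fuel + 1, jump, temp =>
    if jump = c then temp
    else pvTempLoop arr n k c fuel (PySem.Int.mod (jump + k) n)
      (temp ++ [PySem.List.pyGetD arr jump 0])   -- arr[jump]: jump = _ % n is in range whenever the loop runs

-- A's 'while jump != c' loop of the second pass
def pvOutLoop (arr : List Int) (n k c med : Int) : Nat → Int → Int → Int
  | 0, _, out => out
  | fuel + 1, jump, out =>
    if jump = c then out
    else pvOutLoop arr n k c med fuel (PySem.Int.mod (jump + k) n)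
      (out + |med - PySem.List.pyGetD arr jump 0|)

def makeSubKSumEqual (arr : List Int) (k : Int) : Int :=
  let n : Int := arr.length
  let cycles := pvGcdA arr.length k
  let medians := (PySem.List.pyRange 0 cycles 1).foldl (fun medians c =>
    let temp := pvTempLoop arr n k c arr.length (PySem.Int.mod (c + k) n)
      [PySem.List.pyGetD arr (PySem.Int.mod c n) 0]
    let temp := PySem.List.sorted temp (fun x => x) false
    -- int(len(temp)/2): exact float division then int() truncation = floor division on these lengths
    medians ++ [PySem.List.pyGetD temp (PySem.Int.floordiv (temp.length : Int) 2) 0]) []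
  (PySem.List.pyRange 0 cycles 1).foldl (fun output c =>
    pvOutLoop arr n k c (PySem.List.pyGetD medians c 0) arr.length (PySem.Int.mod (c + k) n)
      (output + |PySem.List.pyGetD medians c 0 - PySem.List.pyGetD arr (PySem.Int.mod c n) 0|)) 0

-- ===== PORT B =====
-- the pivot l[len(l)//2] of a nonempty list is one of its elements (termination of pvSelect)
theorem pvPivot_mem_ediv (l : List Int) (hl : ¬ l = []) :
    PySem.List.pyGetD l ((l.length : Int) / 2) 0 ∈ l := by
  have h2 : l.length / 2 < l.length := Nat.div_lt_self (List.length_pos_of_ne_nil hl) one_lt_two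
  rw [show ((l.length : Int) / 2) = ((l.length / 2 : Nat) : Int) from by
    exact_mod_cast (Int.natCast_div l.length 2).symm]
  rw [PySem.List.pyGetD_natCast, List.getD_eq_getElem _ _ h2]
  exact List.getElem_mem _

-- B's _select: iterative quickselect (the while-loop as tail recursion over the shrinking list)
def pvSelect (l : List Int) (j : Nat) : Int :=
  if hl : l = [] then 0   -- Python raises IndexError at l[...] here; unreachable under Pre_
  else
    let p := PySem.List.pyGetD l (PySem.Int.floordiv (l.length : Int) 2) 0
    let less := l.filter (fun x => decide (x < p))
    if j < less.length then pvSelect less j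
    else
      let e := PySem.List.count l p
      if j < less.length + e then p
      else pvSelect (l.filter (fun x => decide (p < x))) (j - (less.length + e))
termination_by l.length
decreasing_by
  all_goals
    simp
    conv_rhs => rw [← List.length_attach (l := l)]
    exact List.length_filter_lt_length_iff_exists.mpr
      ⟨⟨_, pvPivot_mem_ediv l hl⟩, List.mem_attach _ _, by simp⟩

-- B's iterative 'while b: a, b = b, a % b'
def pvGcdB (a b : Int) : Int :=
  if hb : b = 0 then a else pvGcdB b (PySem.Int.mod a b)
termination_by b.natAbs
decreasing_by exact pvModAbsLt a b hb

def makeSubKSumEqual_alt (arr : List Int) (k : Int) : Int :=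
  let n : Int := arr.length
  let g := pvGcdB n k
  (PySem.List.pyRange 0 g 1).foldl (fun total r =>
    let grp := (PySem.List.pyRange r n g).map (fun i => PySem.List.pyGetD arr i 0)
    let m := pvSelect grp (grp.length / 2)   -- len(grp)//2 on a nonnegative length = Nat division
    total + (grp.map (fun x => |m - x|)).sum) 0

-- ===== PRECONDITION & SPEC =====
-- Pre_ excludes only the empty list with k > 0, where A raises ZeroDivisionError at '(c + k) % n' (B raises IndexError there too)
def Pre_makeSubKSumEqual (arr : List Int) (k : Int) : Prop := arr ≠ [] ∨ k ≤ 0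
instance (arr : List Int) (k : Int) : Decidable (Pre_makeSubKSumEqual arr k) := by
  unfold Pre_makeSubKSumEqual; infer_instance
def pvWitness_makeSubKSumEqual : List Int × Int := ([1, 4, 1, 3, 2, 5], 2)

def Spec_makeSubKSumEqual (arr : List Int) (k : Int) (out : Int) : Prop := out = makeSubKSumEqual_alt arr k
instance (arr : List Int) (k : Int) (out : Int) : Decidable (Spec_makeSubKSumEqual arr k out) := by
  unfold Spec_makeSubKSumEqual; infer_instance

-- ===== CLAIM (what is proved, stated in full; the proofs are below) =====
def Claim_equal_makeSubKSumEqual : Prop := ∀ (arr : List Int) (k : Int), Dom_makeSubKSumEqual arr k → Pre_makeSubKSumEqual arr k → Spec_makeSubKSumEqual arr k (makeSubKSumEqual arr k)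

-- ===== LEMMAS AND PROOFS =====

-- proof-only abbreviations
def pvAt (arr : List Int) (i : Int) : Int := PySem.List.pyGetD arr i 0
def pvIdx (n k c : Int) (s : Nat) : Int := PySem.Int.mod (c + s * k) n
def pvM (N K : Nat) : Nat := N / N.gcd K
def pvMed (l : List Int) : Int :=
  PySem.List.pyGetD (PySem.List.sorted l (fun x => x) false)
    (PySem.Int.floordiv ((PySem.List.sorted l (fun x => x) false).length : Int) 2) 0
def pvCost (l : List Int) : Int := (l.map (fun x => |pvMed l - x|)).sum
def pvCycleVals (arr : List Int) (N K c : Nat) : List Int :=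
  (List.range (pvM N K)).map (fun s => pvAt arr (pvIdx (N : Int) (K : Int) (c : Int) s))
def pvBucket (arr : List Int) (G r : Nat) : List Int :=
  ((List.range arr.length).filter (fun i => i % G = r)).map (fun i => arr.getD i 0)
-- counting windows for the selection proof
def pvCLt (l : List Int) (v : Int) : Nat := l.countP (fun x => decide (x < v))
def pvCLe (l : List Int) (v : Int) : Nat := l.countP (fun x => decide (x ≤ v))

theorem pvGcdA_eq (a b : Int) (ha : 0 ≤ a) (hb : 0 ≤ b) : pvGcdA a b = (Int.gcd a b : Int) := by
  unfold pvGcdA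
  split
  · rename_i h; subst h; simp [Int.gcd, Int.natAbs_of_nonneg ha]
  · rename_i h
    have hb' : 0 < b := lt_of_le_of_ne hb (Ne.symm h)
    rw [pvGcdA_eq b (PySem.Int.mod a b) hb (PySem.Int.mod_nonneg a hb')]
    rw [PySem.Int.mod_eq_emod_of_pos hb']
    congr 1
    obtain ⟨A, rfl⟩ := Int.eq_ofNat_of_zero_le ha
    obtain ⟨B, rfl⟩ := Int.eq_ofNat_of_zero_le hb
    rw [Int.gcd, Int.gcd, ← Int.natCast_mod, Int.natAbs_natCast, Int.natAbs_natCast, Int.natAbs_natCast]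
    rw [Nat.gcd_comm A B, Nat.gcd_rec B A, Nat.gcd_comm]
termination_by b.natAbs
decreasing_by exact pvModAbsLt a b (by assumption)

theorem pvGcdB_eq_A (a b : Int) : pvGcdB a b = pvGcdA a b := by
  unfold pvGcdB
  rw [pvGcdA]
  split
  · rfl
  · exact pvGcdB_eq_A b _
termination_by b.natAbs
decreasing_by exact pvModAbsLt a b (by assumption)

theorem pvGcdA_neg (a b : Int) (hb : b < 0) : pvGcdA a b < 0 := by
  unfold pvGcdA
  split
  · omega
  · rename_i h
    by_cases hm : PySem.Int.mod a b = 0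
    · rw [pvGcdA, dif_pos hm]
      exact hb
    · have := PySem.Int.mod_neg_bounds a hb
      exact pvGcdA_neg b _ (by omega)
termination_by b.natAbs
decreasing_by exact pvModAbsLt a b (by assumption)

theorem pvMK (N K : Nat) (hN : 0 < N) : pvM N K * K = N * (K / N.gcd K) := by
  have hG : 0 < N.gcd K := Nat.gcd_pos_of_pos_left K hN
  have h1 : pvM N K * N.gcd K = N := Nat.div_mul_cancel (Nat.gcd_dvd_left N K)
  have h2 : K / N.gcd K * N.gcd K = K := Nat.div_mul_cancel (Nat.gcd_dvd_right N K)
  nlinarith [h1, h2]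

theorem pvDvdIff (N K : Nat) (hN : 0 < N) (t : Int) :
    ((N : Int) ∣ t * (K : Int)) ↔ ((pvM N K : Nat) : Int) ∣ t := by
  have hG : 0 < N.gcd K := Nat.gcd_pos_of_pos_left K hN
  have h1 : pvM N K * N.gcd K = N := Nat.div_mul_cancel (Nat.gcd_dvd_left N K)
  have h2 : K / N.gcd K * N.gcd K = K := Nat.div_mul_cancel (Nat.gcd_dvd_right N K)
  have hcop : Nat.Coprime (pvM N K) (K / N.gcd K) := Nat.coprime_div_gcd_div_gcd hG
  constructor
  · intro h
    have h' : ((pvM N K : Int) * (N.gcd K : Int)) ∣ (t * ((K / N.gcd K : Nat) : Int)) * (N.gcd K : Int) := by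
      have : (t * ((K / N.gcd K : Nat) : Int)) * (N.gcd K : Int) = t * (K : Int) := by
        rw [mul_assoc, ← Int.natCast_mul, h2]
      rw [this, ← Int.natCast_mul, h1]
      exact h
    have h'' : ((pvM N K : Int)) ∣ t * ((K / N.gcd K : Nat) : Int) :=
      (mul_dvd_mul_iff_right (by exact_mod_cast hG.ne' : ((N.gcd K : Int)) ≠ 0)).mp h'
    have hc : IsCoprime ((pvM N K : Int)) (((K / N.gcd K : Nat) : Int)) := by
      rw [Int.isCoprime_iff_gcd_eq_one]
      simpa [Int.gcd_natCast_natCast] using hcop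
    exact hc.dvd_of_dvd_mul_right h''
  · rintro ⟨u, rfl⟩
    refine ⟨u * ((K / N.gcd K : Nat) : Int), ?_⟩
    have : ((pvM N K : Nat) : Int) * (K : Int) = (N : Int) * ((K / N.gcd K : Nat) : Int) := by
      exact_mod_cast congrArg (Nat.cast : Nat → Int) (pvMK N K hN)
    calc ↑(pvM N K) * u * (K : Int) = (↑(pvM N K) * ↑K) * u := by ring
      _ = (↑N * ↑(K / N.gcd K)) * u := by rw [this]
      _ = ↑N * (u * ↑(K / N.gcd K)) := by ring

theorem pvIdx_succ (n k c : Int) (hn : 0 < n) (s : Nat) :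
    PySem.Int.mod (pvIdx n k c s + k) n = pvIdx n k c (s + 1) := by
  unfold pvIdx
  rw [PySem.Int.mod_eq_emod_of_pos hn, PySem.Int.mod_eq_emod_of_pos hn,
      PySem.Int.mod_eq_emod_of_pos hn, Int.emod_add_emod]
  congr 1
  push_cast
  ring

theorem pvIdx_sub_dvd (n k c : Int) (hn : 0 < n) (s1 s2 : Nat)
    (he : pvIdx n k c s1 = pvIdx n k c s2) : n ∣ ((s1 : Int) - (s2 : Int)) * k := by
  unfold pvIdx at he
  rw [PySem.Int.mod_eq_emod_of_pos hn, PySem.Int.mod_eq_emod_of_pos hn] at he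
  rw [Int.emod_eq_emod_iff_emod_sub_eq_zero] at he
  have : (c + s1 * k) - (c + s2 * k) = ((s1 : Int) - (s2 : Int)) * k := by ring
  rw [this] at he
  exact Int.dvd_of_emod_eq_zero he

theorem pvIdx_bounds (n k c : Int) (hn : 0 < n) (s : Nat) :
    0 ≤ pvIdx n k c s ∧ pvIdx n k c s < n :=
  ⟨PySem.Int.mod_nonneg _ hn, PySem.Int.mod_lt _ hn⟩

-- first return to c happens exactly at multiples of M = N / gcd N K
theorem pvIdx_eq_c_iff (N K : Nat) (hN : 0 < N) (c : Int) (hc0 : 0 ≤ c) (hc : c < (N : Int)) (s : Nat) :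
    pvIdx (N : Int) (K : Int) c s = c ↔ ((pvM N K : Nat) : Int) ∣ (s : Int) := by
  have h0 : pvIdx (N : Int) (K : Int) c 0 = c := by
    unfold pvIdx
    rw [PySem.Int.mod_eq_emod_of_pos (by exact_mod_cast hN)]
    simpa using Int.emod_eq_of_lt hc0 hc
  constructor
  · intro h
    have := pvIdx_sub_dvd (N : Int) (K : Int) c (by exact_mod_cast hN) s 0 (by rw [h, h0])
    simpa [pvDvdIff N K hN] using this
  · intro h
    have : (N : Int) ∣ ((s : Int) - (0 : Nat)) * (K : Int) := by
      rw [pvDvdIff N K hN]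
      simpa using h
    unfold pvIdx
    rw [PySem.Int.mod_eq_emod_of_pos (by exact_mod_cast hN)]
    obtain ⟨q, hq⟩ : (N : Int) ∣ (s : Int) * (K : Int) := by simpa using this
    have : c + (s : Int) * (K : Int) = c + (N : Int) * q := by rw [← hq]
    rw [this, Int.add_mul_emod_self_left]
    exact Int.emod_eq_of_lt hc0 hc

theorem pvIdx_inj (N K : Nat) (hN : 0 < N) (c : Int) (s1 s2 : Nat)
    (h1 : s1 < pvM N K) (h2 : s2 < pvM N K)
    (he : pvIdx (N : Int) (K : Int) c s1 = pvIdx (N : Int) (K : Int) c s2) : s1 = s2 := by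
  have hd := pvIdx_sub_dvd (N : Int) (K : Int) c (by exact_mod_cast hN) s1 s2 he
  rw [pvDvdIff N K hN] at hd
  have : (pvM N K : Nat) ∣ ((s1 : Int) - (s2 : Int)).natAbs := by
    rw [← Int.natAbs_natCast (pvM N K)]
    exact Int.natAbs_dvd_natAbs.mpr hd
  have habs : ((s1 : Int) - (s2 : Int)).natAbs < pvM N K := by omega
  have h0 := Nat.eq_zero_of_dvd_of_lt this habs
  omega

theorem pvIdx_mod_gcd (N K : Nat) (hN : 0 < N) (c : Int) (hc0 : 0 ≤ c) (hc : c < ((N.gcd K : Nat) : Int)) (s : Nat) :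
    pvIdx (N : Int) (K : Int) c s % ((N.gcd K : Nat) : Int) = c := by
  have hG : 0 < N.gcd K := Nat.gcd_pos_of_pos_left K hN
  have hGN : ((N.gcd K : Nat) : Int) ∣ (N : Int) := by exact_mod_cast Int.natCast_dvd_natCast.mpr (Nat.gcd_dvd_left N K)
  have hGK : ((N.gcd K : Nat) : Int) ∣ (K : Int) := by exact_mod_cast Int.natCast_dvd_natCast.mpr (Nat.gcd_dvd_right N K)
  unfold pvIdx
  rw [PySem.Int.mod_eq_emod_of_pos (by exact_mod_cast hN)]
  rw [Int.emod_emod_of_dvd _ hGN]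
  obtain ⟨k', hk⟩ := hGK
  rw [hk]
  have : c + (s : Int) * (((N.gcd K : Nat) : Int) * k') = c + ((N.gcd K : Nat) : Int) * ((s : Int) * k') := by
    ring
  rw [this, Int.add_mul_emod_self_left]
  exact Int.emod_eq_of_lt hc0 hc

theorem pvIdx_surj (N K : Nat) (hN : 0 < N) (c : Int) (hc0 : 0 ≤ c) (hc : c < ((N.gcd K : Nat) : Int))
    (i : Nat) (hi : i < N) (hm : (i : Int) % ((N.gcd K : Nat) : Int) = c) :
    ∃ s : Nat, s < pvM N K ∧ pvIdx (N : Int) (K : Int) c s = (i : Int) := by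
  have hG : 0 < N.gcd K := Nat.gcd_pos_of_pos_left K hN
  have hM : 0 < pvM N K := Nat.div_pos (Nat.le_of_dvd hN (Nat.gcd_dvd_left N K)) hG
  have hbez : ((N.gcd K : Nat) : Int) = (N : Int) * Int.gcdA (N : Int) (K : Int) + (K : Int) * Int.gcdB (N : Int) (K : Int) := by
    have := Int.gcd_eq_gcd_ab (N : Int) (K : Int)
    rwa [Int.gcd_natCast_natCast] at this
  set u := Int.gcdA (N : Int) (K : Int) with hu
  set v := Int.gcdB (N : Int) (K : Int) with hv
  have hdvd : ((N.gcd K : Nat) : Int) ∣ ((i : Int) - c) := by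
    rw [Int.dvd_iff_emod_eq_zero, ← Int.emod_eq_emod_iff_emod_sub_eq_zero, hm]
    exact (Int.emod_eq_of_lt hc0 hc).symm
  obtain ⟨d, hd⟩ := hdvd
  set s0 : Int := v * d with hs0
  set s : Int := s0 % ((pvM N K : Nat) : Int) with hs
  have hMpos : (0 : Int) < ((pvM N K : Nat) : Int) := by exact_mod_cast hM
  have hs_nonneg : 0 ≤ s := Int.emod_nonneg s0 (by omega)
  have hs_lt : s < ((pvM N K : Nat) : Int) := Int.emod_lt_of_pos s0 hMpos
  refine ⟨s.toNat, by omega, ?_⟩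
  have hstn : ((s.toNat : Nat) : Int) = s := Int.toNat_of_nonneg hs_nonneg
  have hMK : ((pvM N K : Nat) : Int) * (K : Int) = (N : Int) * ((K / N.gcd K : Nat) : Int) := by
    exact_mod_cast congrArg (Nat.cast : Nat → Int) (pvMK N K hN)
  have hkey : (N : Int) ∣ (c + s * (K : Int)) - (i : Int) := by
    have e1 : s - s0 = -(((pvM N K : Nat) : Int) * (s0 / ((pvM N K : Nat) : Int))) := by
      rw [hs]
      rw [Int.emod_def]
      ring
    have e2 : (c + s * (K : Int)) - (i : Int)
        = (s - s0) * (K : Int) + (c + s0 * (K : Int) - (i : Int)) := by ring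
    have e3 : c + s0 * (K : Int) - (i : Int) = (N : Int) * (-(u * d)) := by
      have : s0 * (K : Int) = d * ((K : Int) * v) := by rw [hs0]; ring
      rw [this]
      have hg : (K : Int) * v = ((N.gcd K : Nat) : Int) - (N : Int) * u := by omega
      rw [hg]
      have : c + d * (((N.gcd K : Nat) : Int) - (N : Int) * u) - (i : Int)
          = (c + ((N.gcd K : Nat) : Int) * d - (i : Int)) - (N : Int) * (u * d) := by ring
      rw [this, ← hd]
      ring
    rw [e2, e3, e1]
    refine dvd_add ?_ ⟨-(u * d), rfl⟩
    refine ⟨-(((K / N.gcd K : Nat) : Int)) * (s0 / ((pvM N K : Nat) : Int)), ?_⟩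
    calc -(((pvM N K : Nat) : Int) * (s0 / ((pvM N K : Nat) : Int))) * (K : Int)
        = -((((pvM N K : Nat) : Int) * (K : Int)) * (s0 / ((pvM N K : Nat) : Int))) := by ring
      _ = -(((N : Int) * ((K / N.gcd K : Nat) : Int)) * (s0 / ((pvM N K : Nat) : Int))) := by rw [hMK]
      _ = (N : Int) * (-(((K / N.gcd K : Nat) : Int)) * (s0 / ((pvM N K : Nat) : Int))) := by ring
  unfold pvIdx
  rw [hstn]
  rw [PySem.Int.mod_eq_emod_of_pos (by exact_mod_cast hN)]
  have : (c + s * (K : Int)) % (N : Int) = (i : Int) % (N : Int) := by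
    rw [Int.emod_eq_emod_iff_emod_sub_eq_zero]
    exact Int.emod_eq_zero_of_dvd hkey
  rw [this]
  exact Int.emod_eq_of_lt (by omega) (by exact_mod_cast hi)

theorem pvIdxPerm (N K : Nat) (hN : 0 < N) (c : Nat) (hc : c < N.gcd K) :
    ((List.range (pvM N K)).map (fun s => pvIdx (N : Int) (K : Int) (c : Int) s)).Perm
      (((List.range N).filter (fun i => i % N.gcd K = c)).map (Nat.cast : Nat → Int)) := by
  have hG : 0 < N.gcd K := Nat.gcd_pos_of_pos_left K hN
  have hGN : N.gcd K ≤ N := Nat.le_of_dvd hN (Nat.gcd_dvd_left N K)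
  have hcG : (c : Int) < ((N.gcd K : Nat) : Int) := by exact_mod_cast hc
  rw [List.perm_ext_iff_of_nodup]
  · intro x
    constructor
    · intro hx
      obtain ⟨s, hs, rfl⟩ := List.mem_map.mp hx
      have hsM := List.mem_range.mp hs
      have hb := pvIdx_bounds (N : Int) (K : Int) (c : Int) (by exact_mod_cast hN) s
      have hmodg := pvIdx_mod_gcd N K hN (c : Int) (by positivity) hcG s
      refine List.mem_map.mpr ⟨(pvIdx (N : Int) (K : Int) (c : Int) s).toNat, ?_, Int.toNat_of_nonneg hb.1⟩
      refine List.mem_filter.mpr ⟨List.mem_range.mpr (by omega), ?_⟩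
      have hmod : (((pvIdx (N : Int) (K : Int) (c : Int) s).toNat % N.gcd K : Nat) : Int) = (c : Int) := by
        push_cast
        rw [Int.toNat_of_nonneg hb.1, hmodg]
      simpa using (by exact_mod_cast hmod : (pvIdx (N : Int) (K : Int) (c : Int) s).toNat % N.gcd K = c)
    · intro hx
      obtain ⟨i, hi, rfl⟩ := List.mem_map.mp hx
      obtain ⟨hiN, himod⟩ := List.mem_filter.mp hi
      have hiN' := List.mem_range.mp hiN
      have himod' : i % N.gcd K = c := by simpa using himod
      obtain ⟨s, hs, he⟩ := pvIdx_surj N K hN (c : Int) (by positivity) hcG i hiN'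
        (by exact_mod_cast congrArg (Nat.cast : Nat → Int) himod')
      exact List.mem_map.mpr ⟨s, List.mem_range.mpr hs, he⟩
  · refine List.Nodup.map_on ?_ (List.nodup_range)
    intro s1 h1 s2 h2 he
    exact pvIdx_inj N K hN (c : Int) s1 s2 (List.mem_range.mp h1) (List.mem_range.mp h2) he
  · exact List.Nodup.map (fun a b h => by exact_mod_cast h) (List.Nodup.filter _ List.nodup_range)

theorem pvIdx_M (N K : Nat) (hN : 0 < N) (c : Int) (hc0 : 0 ≤ c) (hcN : c < (N : Int)) :
    pvIdx (N : Int) (K : Int) c (pvM N K) = c :=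
  (pvIdx_eq_c_iff N K hN c hc0 hcN (pvM N K)).mpr dvd_rfl

theorem pvIdx_ne_c (N K : Nat) (hN : 0 < N) (c : Int) (hc0 : 0 ≤ c) (hcN : c < (N : Int))
    (t : Nat) (ht0 : 0 < t) (htM : t < pvM N K) : pvIdx (N : Int) (K : Int) c t ≠ c := by
  intro h
  rw [pvIdx_eq_c_iff N K hN c hc0 hcN t] at h
  have : pvM N K ∣ t := by exact_mod_cast h
  have := Nat.le_of_dvd ht0 this
  omega

theorem pvTempLoop_spec (arr : List Int) (N K : Nat) (hN : 0 < N) (c : Int) (hc0 : 0 ≤ c)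
    (hcN : c < (N : Int)) : ∀ (dm t fuel : Nat), t + dm = pvM N K → 1 ≤ t → dm ≤ fuel →
    ∀ acc, pvTempLoop arr (N : Int) (K : Int) c fuel (pvIdx (N : Int) (K : Int) c t) acc
      = acc ++ (List.range' t dm).map (fun s => PySem.List.pyGetD arr (pvIdx (N : Int) (K : Int) c s) 0) := by
  intro dm
  induction dm with
  | zero =>
    intro t fuel ht _ _ acc
    have htM : t = pvM N K := by omega
    subst htM
    have hc : pvIdx (N : Int) (K : Int) c (pvM N K) = c := pvIdx_M N K hN c hc0 hcN
    cases fuel <;> simp [pvTempLoop, hc]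
  | succ d ih =>
    intro t fuel ht ht1 hf acc
    have hne : pvIdx (N : Int) (K : Int) c t ≠ c := pvIdx_ne_c N K hN c hc0 hcN t (by omega) (by omega)
    obtain ⟨f, rfl⟩ : ∃ f, fuel = f + 1 := ⟨fuel - 1, by omega⟩
    rw [show pvTempLoop arr (N : Int) (K : Int) c (f + 1) (pvIdx (N : Int) (K : Int) c t) acc
        = pvTempLoop arr (N : Int) (K : Int) c f
            (PySem.Int.mod (pvIdx (N : Int) (K : Int) c t + (K : Int)) (N : Int))
            (acc ++ [PySem.List.pyGetD arr (pvIdx (N : Int) (K : Int) c t) 0]) from by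
      simp [pvTempLoop, hne]]
    rw [pvIdx_succ (N : Int) (K : Int) c (by exact_mod_cast hN) t]
    rw [ih (t + 1) f (by omega) (by omega) (by omega)]
    have : List.range' t (d + 1) = t :: List.range' (t + 1) d := List.range'_succ
    rw [this]
    simp

theorem pvOutLoop_spec (arr : List Int) (N K : Nat) (hN : 0 < N) (c med : Int) (hc0 : 0 ≤ c)
    (hcN : c < (N : Int)) : ∀ (dm t fuel : Nat), t + dm = pvM N K → 1 ≤ t → dm ≤ fuel →
    ∀ out, pvOutLoop arr (N : Int) (K : Int) c med fuel (pvIdx (N : Int) (K : Int) c t) out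
      = out + ((List.range' t dm).map
          (fun s => |med - PySem.List.pyGetD arr (pvIdx (N : Int) (K : Int) c s) 0|)).sum := by
  intro dm
  induction dm with
  | zero =>
    intro t fuel ht _ _ out
    have htM : t = pvM N K := by omega
    subst htM
    have hc : pvIdx (N : Int) (K : Int) c (pvM N K) = c := pvIdx_M N K hN c hc0 hcN
    cases fuel <;> simp [pvOutLoop, hc]
  | succ d ih =>
    intro t fuel ht ht1 hf out
    have hne : pvIdx (N : Int) (K : Int) c t ≠ c := pvIdx_ne_c N K hN c hc0 hcN t (by omega) (by omega)
    obtain ⟨f, rfl⟩ : ∃ f, fuel = f + 1 := ⟨fuel - 1, by omega⟩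
    rw [show pvOutLoop arr (N : Int) (K : Int) c med (f + 1) (pvIdx (N : Int) (K : Int) c t) out
        = pvOutLoop arr (N : Int) (K : Int) c med f
            (PySem.Int.mod (pvIdx (N : Int) (K : Int) c t + (K : Int)) (N : Int))
            (out + |med - PySem.List.pyGetD arr (pvIdx (N : Int) (K : Int) c t) 0|) from by
      simp [pvOutLoop, hne]]
    rw [pvIdx_succ (N : Int) (K : Int) c (by exact_mod_cast hN) t]
    rw [ih (t + 1) f (by omega) (by omega) (by omega)]
    have : List.range' t (d + 1) = t :: List.range' (t + 1) d := List.range'_succ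
    rw [this]
    simp [add_assoc]

theorem pvIdx_zero (n k c : Int) : pvIdx n k c 0 = PySem.Int.mod c n := by
  unfold pvIdx; norm_num

theorem pvIdx_one (n k c : Int) : pvIdx n k c 1 = PySem.Int.mod (c + k) n := by
  unfold pvIdx; norm_num

theorem pvRangeM (M : Nat) (hM : 0 < M) : List.range M = 0 :: List.range' 1 (M - 1) := by
  obtain ⟨m, rfl⟩ : ∃ m, M = m + 1 := ⟨M - 1, by omega⟩
  rw [List.range_eq_range', List.range'_succ]
  simp

theorem pvA_char (arr : List Int) (k : Int) (harr : arr ≠ []) (hk : 0 ≤ k) :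
    makeSubKSumEqual arr k
      = ((List.range (arr.length.gcd k.toNat)).map
          (fun c => pvCost (pvCycleVals arr arr.length k.toNat c))).sum := by
  have hN : 0 < arr.length := List.length_pos_of_ne_nil harr
  set N := arr.length with hNdef
  set K := k.toNat with hKdef
  have hkK : (K : Int) = k := Int.toNat_of_nonneg hk
  set G := N.gcd K with hGdef
  set M := pvM N K with hMdef
  have hG0 : 0 < G := Nat.gcd_pos_of_pos_left K hN
  have hGN : G ≤ N := Nat.le_of_dvd hN (Nat.gcd_dvd_left N K)
  have hM0 : 0 < M := Nat.div_pos (Nat.le_of_dvd hN (Nat.gcd_dvd_left N K)) hG0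
  have hMN : M ≤ N := Nat.div_le_self N G
  have hcycles : pvGcdA ((N : Nat) : Int) k = (G : Int) := by
    rw [← hkK, pvGcdA_eq _ _ (by positivity) (by positivity), Int.gcd_natCast_natCast]
  have hmodc : ∀ c : Nat, c < G → PySem.Int.mod ((c : Nat) : Int) (N : Int) = (c : Int) := by
    intro c hc
    rw [PySem.Int.mod_natCast, Nat.mod_eq_of_lt (by omega)]
  have htemp : ∀ c : Nat, c < G →
      pvTempLoop arr (N : Int) k (c : Int) N (PySem.Int.mod ((c : Int) + k) (N : Int))
        [PySem.List.pyGetD arr (PySem.Int.mod (c : Int) (N : Int)) 0]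
      = pvCycleVals arr N K c := by
    intro c hc
    have hc0 : (0 : Int) ≤ (c : Int) := by positivity
    have hcN : ((c : Nat) : Int) < (N : Int) := by exact_mod_cast (by omega : c < N)
    rw [← hkK, ← pvIdx_one (N : Int) (K : Int) (c : Int),
       ← pvIdx_zero (N : Int) (K : Int) (c : Int)]
    rw [pvTempLoop_spec arr N K hN (c : Int) hc0 hcN (M - 1) 1 N (by omega) le_rfl (by omega)]
    unfold pvCycleVals pvAt
    rw [pvRangeM M hM0]
    simp
  unfold makeSubKSumEqual
  dsimp only
  rw [hcycles, PySem.List.pyRange_zero_nat G, List.foldl_map, List.foldl_map]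
  rw [PySem.List.foldl_congr_mem' _ _
    (fun medians (c : Nat) => medians ++ [pvMed (pvCycleVals arr N K c)]) _ (by
      intro c hc acc
      have hcG := List.mem_range.mp hc
      rw [htemp c hcG]
      rfl)]
  rw [PySem.List.foldl_append_singleton_eq_map]
  rw [PySem.List.foldl_congr_mem' _ _
    (fun out (c : Nat) => out + pvCost (pvCycleVals arr N K c)) _ (by
      intro c hc out
      have hcG := List.mem_range.mp hc
      have hc0 : (0 : Int) ≤ (c : Int) := by positivity
      have hcN : ((c : Nat) : Int) < (N : Int) := by exact_mod_cast (by omega : c < N)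
      have hmed : PySem.List.pyGetD ([] ++ (List.range G).map (fun c => pvMed (pvCycleVals arr N K c))) ((c : Nat) : Int) 0
          = pvMed (pvCycleVals arr N K c) := by
        rw [List.nil_append, PySem.List.pyGetD_natCast, PySem.List.getD_map_range _ _ _ _ hcG]
      rw [hmed]
      rw [← hkK, ← pvIdx_one (N : Int) (K : Int) (c : Int),
         ← pvIdx_zero (N : Int) (K : Int) (c : Int)]
      rw [pvOutLoop_spec arr N K hN (c : Int) _ hc0 hcN (M - 1) 1 N (by omega) le_rfl (by omega)]
      rw [add_assoc]
      congr 1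
      unfold pvCost
      unfold pvCycleVals
      rw [List.map_map]
      rw [pvRangeM M hM0]
      simp [pvAt]
      rfl)]
  rw [PySem.List.foldl_add]
  simp

-- ---------- selection correctness: pvSelect l j is the j-th entry of sorted(l) ----------

-- the pivot l[len(l)//2] of a nonempty list is one of its elements
theorem pvPivot_mem (l : List Int) (hl : ¬ l = []) :
    PySem.List.pyGetD l (PySem.Int.floordiv (l.length : Int) 2) 0 ∈ l := by
  rw [PySem.Int.floordiv_eq_ediv_of_pos (by norm_num)]
  exact pvPivot_mem_ediv l hl

theorem pvCLe_split (l : List Int) (p : Int) : pvCLe l p = pvCLt l p + l.count p := by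
  induction l with
  | nil => simp [pvCLe, pvCLt]
  | cons x xs ih =>
    simp only [pvCLe, pvCLt, List.countP_cons, List.count_cons, beq_iff_eq] at *
    rcases lt_trichotomy x p with h | h | h
    · simp [h, le_of_lt h, ne_of_lt h]; omega
    · subst h; simp; omega
    · simp [not_le.mpr h, not_lt.mpr (le_of_lt h), (ne_of_gt h : x ≠ p)]; omega

theorem pvLen_split (l : List Int) (p : Int) :
    l.length = pvCLt l p + l.count p + (l.filter (fun x => decide (p < x))).length := by
  induction l with
  | nil => simp [pvCLt]
  | cons x xs ih =>
    simp only [pvCLt, List.countP_cons, List.count_cons, List.filter_cons, List.length_cons,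
      beq_iff_eq] at *
    rcases lt_trichotomy x p with h | h | h
    · simp [h, ne_of_lt h, not_lt.mpr (le_of_lt h)]; omega
    · subst h; simp; omega
    · simp [h, not_lt.mpr (le_of_lt h), (ne_of_gt h : x ≠ p)]; omega

theorem pvCLt_filter_lt (l : List Int) (p v : Int) (hv : v ≤ p) :
    pvCLt (l.filter (fun x => decide (x < p))) v = pvCLt l v := by
  unfold pvCLt
  rw [List.countP_filter]
  exact List.countP_congr (by intro x _; constructor <;> (intro h; simp at h ⊢; omega))

theorem pvCLe_filter_lt (l : List Int) (p v : Int) (hv : v < p) :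
    pvCLe (l.filter (fun x => decide (x < p))) v = pvCLe l v := by
  unfold pvCLe
  rw [List.countP_filter]
  exact List.countP_congr (by intro x _; constructor <;> (intro h; simp at h ⊢; omega))

theorem pvCLt_split_gt (l : List Int) (p v : Int) (hv : p < v) :
    pvCLt l v = pvCLt l p + l.count p + pvCLt (l.filter (fun x => decide (p < x))) v := by
  have hperm := List.filter_append_perm (fun x => decide (p < x)) l
  have h1 : pvCLt l v
      = pvCLt (l.filter (fun x => decide (p < x))) v
        + pvCLt (l.filter (fun x => !decide (p < x))) v := by
    unfold pvCLt
    rw [← List.countP_append]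
    exact (hperm.countP_eq _).symm
  have h2 : pvCLt (l.filter (fun x => !decide (p < x))) v = pvCLe l p := by
    unfold pvCLt pvCLe
    rw [List.countP_filter]
    exact List.countP_congr (by intro x _; constructor <;> (intro h; simp at h ⊢; omega))
  rw [h1, h2, pvCLe_split l p]
  omega

theorem pvCLe_split_gt (l : List Int) (p v : Int) (hv : p < v) :
    pvCLe l v = pvCLt l p + l.count p + pvCLe (l.filter (fun x => decide (p < x))) v := by
  have hperm := List.filter_append_perm (fun x => decide (p < x)) l
  have h1 : pvCLe l v
      = pvCLe (l.filter (fun x => decide (p < x))) v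
        + pvCLe (l.filter (fun x => !decide (p < x))) v := by
    unfold pvCLe
    rw [← List.countP_append]
    exact (hperm.countP_eq _).symm
  have h2 : pvCLe (l.filter (fun x => !decide (p < x))) v = pvCLe l p := by
    unfold pvCLe
    rw [List.countP_filter]
    exact List.countP_congr (by intro x _; constructor <;> (intro h; simp at h ⊢; omega))
  rw [h1, h2, pvCLe_split l p]
  omega

theorem pvCLt_pivot (l : List Int) (p : Int) :
    (l.filter (fun x => decide (x < p))).length = pvCLt l p := by
  unfold pvCLt
  exact List.countP_eq_length_filter.symm

theorem pvSelect_mem : ∀ (N : Nat) (l : List Int) (j : Nat), l.length ≤ N → j < l.length →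
    pvSelect l j ∈ l := by
  intro N
  induction N with
  | zero => intro l j h1 h2; omega
  | succ N ih =>
    intro l j h1 h2
    have hl : ¬ l = [] := by intro h; subst h; simp at h2
    rw [pvSelect]
    simp only [hl, dite_false]
    set p := PySem.List.pyGetD l (PySem.Int.floordiv (l.length : Int) 2) 0 with hp
    split_ifs with c1 c2
    · have hlen : (l.filter (fun x => decide (x < p))).length < l.length :=
        List.length_filter_lt_length_iff_exists.mpr
          ⟨p, by rw [hp]; exact pvPivot_mem l hl, by simp⟩
      exact List.mem_of_mem_filter (ih _ j (by omega) c1)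
    · rw [hp]; exact pvPivot_mem l hl
    · have hlen : (l.filter (fun x => decide (p < x))).length < l.length :=
        List.length_filter_lt_length_iff_exists.mpr
          ⟨p, by rw [hp]; exact pvPivot_mem l hl, by simp⟩
      have hsplit := pvLen_split l p
      rw [← pvCLt_pivot l p] at hsplit
      have hj' : j - ((l.filter (fun x => decide (x < p))).length + PySem.List.count l p)
          < (l.filter (fun x => decide (p < x))).length := by
        rw [PySem.List.count_eq] at *
        omega
      exact List.mem_of_mem_filter (ih _ _ (by omega) hj')

theorem pvSelect_window : ∀ (N : Nat) (l : List Int) (j : Nat), l.length ≤ N → j < l.length →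
    pvCLt l (pvSelect l j) ≤ j ∧ j < pvCLe l (pvSelect l j) := by
  intro N
  induction N with
  | zero => intro l j h1 h2; omega
  | succ N ih =>
    intro l j h1 h2
    have hl : ¬ l = [] := by intro h; subst h; simp at h2
    rw [pvSelect]
    simp only [hl, dite_false]
    set p := PySem.List.pyGetD l (PySem.Int.floordiv (l.length : Int) 2) 0 with hp
    set less := l.filter (fun x => decide (x < p)) with hless
    have hlessLen : less.length < l.length := by
      rw [hless]
      exact List.length_filter_lt_length_iff_exists.mpr
        ⟨p, by rw [hp]; exact pvPivot_mem l hl, by simp⟩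
    split_ifs with c1 c2
    · -- recurse into less
      set v := pvSelect less j with hv
      have hvmem : v ∈ less := pvSelect_mem N less j (by omega) c1
      have hvp : v < p := by
        have := (List.mem_filter.mp hvmem).2
        simpa using this
      have hwin := ih less j (by omega) c1
      rw [← hv] at hwin
      exact ⟨by rw [← pvCLt_filter_lt l p v (le_of_lt hvp), ← hless]; exact hwin.1,
             by rw [← pvCLe_filter_lt l p v hvp, ← hless]; exact hwin.2⟩
    · -- the pivot itself
      constructor
      · rw [← pvCLt_pivot l p, ← hless]; omega
      · rw [pvCLe_split, ← pvCLt_pivot l p, ← hless, ← PySem.List.count_eq]; omega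
    · -- recurse into gr
      set gr := l.filter (fun x => decide (p < x)) with hgr
      have hgrLen : gr.length < l.length := by
        rw [hgr]
        exact List.length_filter_lt_length_iff_exists.mpr
          ⟨p, by rw [hp]; exact pvPivot_mem l hl, by simp⟩
      have hsplit := pvLen_split l p
      rw [← pvCLt_pivot l p, ← hless, ← hgr] at hsplit
      have hcnt : PySem.List.count l p = l.count p := PySem.List.count_eq l p
      have hj' : j - (less.length + PySem.List.count l p) < gr.length := by omega
      set j' := j - (less.length + PySem.List.count l p) with hj'def
      set v := pvSelect gr j' with hv
      have hvmem : v ∈ gr := pvSelect_mem N gr j' (by omega) hj'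
      have hvp : p < v := by
        have := (List.mem_filter.mp hvmem).2
        simpa using this
      have hwin := ih gr j' (by omega) hj'
      rw [← hv] at hwin
      constructor
      · rw [pvCLt_split_gt l p v hvp, ← pvCLt_pivot l p, ← hless, ← hgr]; omega
      · rw [pvCLe_split_gt l p v hvp, ← pvCLt_pivot l p, ← hless, ← hgr]; omega

theorem pvWindow_unique (l : List Int) (j : Nat) (v w : Int)
    (hv : pvCLt l v ≤ j ∧ j < pvCLe l v) (hw : pvCLt l w ≤ j ∧ j < pvCLe l w) : v = w := by
  have key : ∀ a b : Int, a < b → pvCLe l a ≤ pvCLt l b := by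
    intro a b hab
    exact List.countP_mono_left (by intro x _ h; simp at h ⊢; omega)
  rcases lt_trichotomy v w with h | h | h
  · have := key v w h; omega
  · exact h
  · have := key w v h; omega

theorem pvSorted_window (l : List Int) (j : Nat) (hj : j < l.length) :
    pvCLt l ((PySem.List.sorted l (fun x => x) false).getD j 0) ≤ j
      ∧ j < pvCLe l ((PySem.List.sorted l (fun x => x) false).getD j 0) := by
  set s := PySem.List.sorted l (fun x => x) false with hs
  have hlen : s.length = l.length := PySem.List.length_sorted l _ _
  have hperm : s.Perm l := PySem.List.sorted_perm l _ _
  have hpair : s.Pairwise (fun a b : Int => a ≤ b) := by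
    have := PySem.List.sorted_pairwise l (fun x : Int => x)
    simpa [hs] using this
  have hjs : j < s.length := by omega
  rw [List.getD_eq_getElem s 0 hjs]
  have hLt : pvCLt l s[j] = pvCLt s s[j] := (hperm.countP_eq _).symm
  have hLe : pvCLe l s[j] = pvCLe s s[j] := (hperm.countP_eq _).symm
  rw [hLt, hLe]
  constructor
  · have h0 : List.countP (fun x => decide (x < s[j])) (s.drop j) = 0 := by
      rw [List.countP_eq_zero]
      intro a ha
      rw [List.drop_eq_getElem_cons hjs] at ha
      rcases List.mem_cons.mp ha with rfl | ha'
      · simp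
      · have hle : s[j] ≤ a := List.rel_of_pairwise_cons
          (by rw [← List.drop_eq_getElem_cons hjs]; exact hpair.drop) ha'
        simp only [decide_eq_true_eq]
        omega
    have hsum : pvCLt s s[j]
        = List.countP (fun x => decide (x < s[j])) (s.take j)
          + List.countP (fun x => decide (x < s[j])) (s.drop j) := by
      unfold pvCLt
      rw [← List.countP_append, List.take_append_drop]
    have htk : (s.take j).length = j := by rw [List.length_take]; omega
    have hlc := List.countP_le_length (p := fun x => decide (x < s[j])) (l := s.take j)
    omega
  · have htk : (s.take (j + 1)).length = j + 1 := by rw [List.length_take]; omega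
    have hfull : List.countP (fun x => decide (x ≤ s[j])) (s.take (j + 1))
        = (s.take (j + 1)).length := by
      rw [List.countP_eq_length]
      intro a ha
      obtain ⟨i, hm, rfl⟩ := List.mem_take_iff_getElem.mp ha
      simp only [decide_eq_true_eq]
      rcases Nat.lt_or_ge i j with h | h
      · exact List.pairwise_iff_getElem.mp hpair i j (by omega) hjs h
      · have : i = j := by omega
        subst this
        exact le_rfl
    have hsum : pvCLe s s[j]
        = List.countP (fun x => decide (x ≤ s[j])) (s.take (j + 1))
          + List.countP (fun x => decide (x ≤ s[j])) (s.drop (j + 1)) := by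
      unfold pvCLe
      rw [← List.countP_append, List.take_append_drop]
    omega

theorem pvSelect_eq_sorted (l : List Int) (j : Nat) (hj : j < l.length) :
    pvSelect l j = (PySem.List.sorted l (fun x => x) false).getD j 0 :=
  pvWindow_unique l j _ _ (pvSelect_window l.length l j le_rfl hj) (pvSorted_window l j hj)

theorem pvSelect_eq_med (l : List Int) (hl : l ≠ []) :
    pvSelect l (l.length / 2) = pvMed l := by
  have h0 : 0 < l.length := List.length_pos_of_ne_nil hl
  rw [pvSelect_eq_sorted l (l.length / 2) (Nat.div_lt_self h0 one_lt_two)]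
  unfold pvMed
  rw [PySem.List.length_sorted]
  rw [show PySem.Int.floordiv (l.length : Int) 2 = ((l.length / 2 : Nat) : Int) from by
    exact_mod_cast PySem.Int.floordiv_natCast l.length 2]
  rw [PySem.List.pyGetD_natCast]

-- ---------- B's characterisation ----------

-- the stride class r, r+g, r+2g, … < n is exactly the residue class r mod g
-- the stride class r, r+g, r+2g, ... < n is exactly the residue class r mod g
theorem pvStridePerm (arr : List Int) (G r : Nat) (hG : 0 < G) (hr : r < G) :
    ((PySem.List.pyRange (r : Int) (arr.length : Int) (G : Int)).map
        (fun i => PySem.List.pyGetD arr i 0)).Perm (pvBucket arr G r) := by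
  have hGZ : (0 : Int) < (G : Int) := by exact_mod_cast hG
  have hidx : (PySem.List.pyRange (r : Int) (arr.length : Int) (G : Int)).Perm
      (((List.range arr.length).filter (fun i => i % G = r)).map (Nat.cast : Nat → Int)) := by
    rw [List.perm_ext_iff_of_nodup]
    · intro x
      rw [PySem.List.mem_pyRange_iff_of_pos hGZ]
      constructor
      · rintro ⟨h1, h2, q, hq⟩
        have hx0 : 0 ≤ x := le_trans (by positivity) h1
        have hq0 : 0 ≤ q := by nlinarith [hq, h1, hGZ]
        set i : Nat := r + G * q.toNat with hidef
        have hqq : ((q.toNat : Nat) : Int) = q := Int.toNat_of_nonneg hq0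
        have hix : (i : Int) = x := by
          push_cast [hidef, hqq]
          linarith
        have himod : i % G = r := by
          rw [hidef, Nat.add_mul_mod_self_left, Nat.mod_eq_of_lt hr]
        refine List.mem_map.mpr ⟨i, List.mem_filter.mpr ⟨List.mem_range.mpr ?_, by simp [himod]⟩, hix⟩
        omega
      · intro hx
        obtain ⟨i, hi, rfl⟩ := List.mem_map.mp hx
        obtain ⟨hiN, himod⟩ := List.mem_filter.mp hi
        have hiN' := List.mem_range.mp hiN
        have himod' : i % G = r := by simpa using himod
        have hle : r ≤ i := himod' ▸ Nat.mod_le i G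
        refine ⟨by exact_mod_cast hle, by exact_mod_cast hiN', ⟨(i / G : Nat), ?_⟩⟩
        have hdm : G * (i / G) + r = i := by
          conv_rhs => rw [← Nat.div_add_mod i G]
          omega
        have h2 : (G : Int) * ((i / G : Nat) : Int) + (r : Int) = (i : Int) := by
          exact_mod_cast hdm
        linarith
    · rw [PySem.List.pyRange_of_pos (r : Int) (arr.length : Int) hGZ]
      refine List.Nodup.map_on ?_ List.nodup_range
      intro a _ b _ h
      have h2 : (G : Int) * a = (G : Int) * b := by omega
      have := mul_left_cancel₀ (by omega : (G : Int) ≠ 0) h2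
      exact_mod_cast this
    · exact List.Nodup.map (fun a b h => by exact_mod_cast h) (List.Nodup.filter _ List.nodup_range)
  have := hidx.map (fun i => PySem.List.pyGetD arr i 0)
  refine this.trans ?_
  rw [List.map_map]
  unfold pvBucket
  apply List.Perm.of_eq
  apply List.map_congr_left
  intro i _
  show PySem.List.pyGetD arr ((i : Nat) : Int) 0 = arr.getD i 0
  rw [PySem.List.pyGetD_natCast]

theorem pvStride_ne_nil (arr : List Int) (G r : Nat) (harr : arr ≠ []) (hG : 0 < G)
    (hGN : G ≤ arr.length) (hr : r < G) :
    (PySem.List.pyRange (r : Int) (arr.length : Int) (G : Int)).map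
      (fun i => PySem.List.pyGetD arr i 0) ≠ [] := by
  have hN : 0 < arr.length := List.length_pos_of_ne_nil harr
  have : (r : Int) ∈ PySem.List.pyRange (r : Int) (arr.length : Int) (G : Int) := by
    rw [PySem.List.mem_pyRange_iff_of_pos (by exact_mod_cast hG)]
    exact ⟨le_rfl, by exact_mod_cast (by omega : r < arr.length), by simp⟩
  intro h
  rw [List.map_eq_nil_iff] at h
  rw [h] at this
  simp at this

theorem pvB_char (arr : List Int) (k : Int) (harr : arr ≠ []) (hk : 0 ≤ k) :
    makeSubKSumEqual_alt arr k
      = ((List.range (arr.length.gcd k.toNat)).map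
          (fun r => pvCost (pvBucket arr (arr.length.gcd k.toNat) r))).sum := by
  have hN : 0 < arr.length := List.length_pos_of_ne_nil harr
  set N := arr.length with hNdef
  set K := k.toNat with hKdef
  have hkK : (K : Int) = k := Int.toNat_of_nonneg hk
  set G := N.gcd K with hGdef
  have hG0 : 0 < G := Nat.gcd_pos_of_pos_left K hN
  have hGN : G ≤ N := Nat.le_of_dvd hN (Nat.gcd_dvd_left N K)
  have hg : pvGcdB ((N : Nat) : Int) k = (G : Int) := by
    rw [pvGcdB_eq_A, ← hkK, pvGcdA_eq _ _ (by positivity) (by positivity), Int.gcd_natCast_natCast]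
  unfold makeSubKSumEqual_alt
  dsimp only
  rw [hg, PySem.List.pyRange_zero_nat G, List.foldl_map]
  rw [PySem.List.foldl_congr_mem' _ _
    (fun (total : Int) (r : Nat) => total + pvCost (pvBucket arr G r)) _ (by
      intro r hr total
      have hrG := List.mem_range.mp hr
      set grp := (PySem.List.pyRange (r : Int) (N : Int) (G : Int)).map
        (fun i => PySem.List.pyGetD arr i 0) with hgrp
      have hne : grp ≠ [] := pvStride_ne_nil arr G r harr hG0 hGN hrG
      have hperm : grp.Perm (pvBucket arr G r) := pvStridePerm arr G r hG0 hrG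
      dsimp only
      rw [pvSelect_eq_med grp hne]
      have hmed : pvMed grp = pvMed (pvBucket arr G r) := by
        unfold pvMed
        rw [PySem.List.sorted_eq_sorted_of_perm grp (pvBucket arr G r) (fun x => x)
          (fun a b hab => hab) hperm]
      rw [hmed]
      congr 1
      have := (hperm.map (fun x => |pvMed (pvBucket arr G r) - x|)).sum_eq
      unfold pvCost
      exact this)]
  rw [PySem.List.foldl_add]
  simp

theorem pvCost_perm (l1 l2 : List Int) (h : l1.Perm l2) : pvCost l1 = pvCost l2 := by
  have hmed : pvMed l1 = pvMed l2 := by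
    unfold pvMed
    rw [PySem.List.sorted_eq_sorted_of_perm l1 l2 (fun x => x) (fun a b hab => hab) h]
  unfold pvCost
  rw [hmed]
  exact (h.map (fun x => |pvMed l2 - x|)).sum_eq

theorem pvCycle_perm_bucket (arr : List Int) (k : Int) (harr : arr ≠ [])
    (c : Nat) (hc : c < arr.length.gcd k.toNat) :
    (pvCycleVals arr arr.length k.toNat c).Perm (pvBucket arr (arr.length.gcd k.toNat) c) := by
  have hN : 0 < arr.length := List.length_pos_of_ne_nil harr
  have hperm := pvIdxPerm arr.length k.toNat hN c hc
  have h2 := hperm.map (pvAt arr)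
  rw [List.map_map, List.map_map] at h2
  unfold pvCycleVals
  unfold pvBucket
  rw [show (List.map (fun s => pvAt arr (pvIdx (arr.length : Int) (k.toNat : Int) (c : Int) s))
        (List.range (pvM arr.length k.toNat)))
      = List.map (pvAt arr ∘ fun s => pvIdx (arr.length : Int) (k.toNat : Int) (c : Int) s)
        (List.range (pvM arr.length k.toNat)) from rfl]
  refine h2.trans ?_
  rw [show List.map (pvAt arr ∘ (Nat.cast : Nat → Int))
        ((List.range arr.length).filter (fun i => i % arr.length.gcd k.toNat = c))
      = List.map (fun i => arr.getD i 0)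
        ((List.range arr.length).filter (fun i => i % arr.length.gcd k.toNat = c)) from by
    apply List.map_congr_left
    intro i _
    show pvAt arr ((i : Nat) : Int) = arr.getD i 0
    unfold pvAt
    rw [PySem.List.pyGetD_natCast]]

-- ===== VERDICT (by name: the statement is the Claim_ definition above) =====
theorem makeSubKSumEqual_spec : Claim_equal_makeSubKSumEqual := by
  intro arr k _ hpre
  unfold Spec_makeSubKSumEqual
  by_cases hneg : k < 0
  · have hcycA : pvGcdA ((arr.length : Nat) : Int) k < 0 := pvGcdA_neg _ _ hneg
    have hcycB : pvGcdB ((arr.length : Nat) : Int) k < 0 := by rw [pvGcdB_eq_A]; exact hcycA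
    unfold makeSubKSumEqual makeSubKSumEqual_alt
    dsimp only
    rw [PySem.List.pyRange_one_eq_nil (by omega), PySem.List.pyRange_one_eq_nil (by omega)]
    simp
  · by_cases harr : arr = []
    · subst harr
      have hk0 : k = 0 := by
        unfold Pre_makeSubKSumEqual at hpre
        rcases hpre with h | h
        · exact absurd rfl h
        · omega
      subst hk0
      have h0A : pvGcdA ((List.length ([] : List Int) : Nat) : Int) 0 = 0 := by
        rw [pvGcdA]; simp
      have h0B : pvGcdB ((List.length ([] : List Int) : Nat) : Int) 0 = 0 := by
        rw [pvGcdB]; simp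
      unfold makeSubKSumEqual makeSubKSumEqual_alt
      dsimp only
      rw [h0A, h0B, PySem.List.pyRange_one_eq_nil le_rfl]
      simp
    · rw [pvA_char arr k harr (by omega), pvB_char arr k harr (by omega)]
      apply congrArg List.sum
      apply List.map_congr_left
      intro c hc
      exact pvCost_perm _ _
        (pvCycle_perm_bucket arr k harr c (List.mem_range.mp hc))
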